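-- pv_equiv track=rewrite | github.com/PolychronMidi/Polychron | scripts/pipeline/hme/detect-doc-drift.py | _analyze_rule_usage
-- ===== SOURCE A (Python) =====
-- def _split_into_rounds(events: list[dict]) -> list[list[dict]]:
--     rounds: list[list[dict]] = []
--     current: list[dict] = []
--     for ev in events:
--         current.append(ev)
--         if ev.get("event") == "round_complete":
--             rounds.append(current)
--             current = []
--     if current:
--         rounds.append(current)
--     return rounds
--
-- def _analyze_rule_usage(events: list[dict], lookback_rounds: int = 20) -> dict:
--     """Per-round counts of coherence_violation and productive_incoherence
--     events — the activity stream is our proxy for 'did a hard rule fire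
--     usefully'."""
--     rounds = _split_into_rounds(events)
--     closed = [r for r in rounds if r and r[-1].get("event") == "round_complete"]
--     window = closed[-lookback_rounds:]
--     totals = {
--         "rounds_in_window": len(window),
--         "coherence_violation": 0,
--         "productive_incoherence": 0,
--     }
--     for r in window:
--         for ev in r:
--             e = ev.get("event")
--             if e == "coherence_violation":
--                 totals["coherence_violation"] += 1
--             elif e == "productive_incoherence":
--                 totals["productive_incoherence"] += 1
--     return totals
-- ===== SOURCE B (Python) =====
-- def _analyze_rule_usage(events: list[dict], lookback_rounds: int = 20) -> dict:
--     """Single flat pass: locate round_complete positions, pick the window as one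
--     contiguous slice of events, and count within it."""
--     ends = [i for i, ev in enumerate(events) if ev.get("event") == "round_complete"]
--     win = ends[-lookback_rounds:]
--     totals = {
--         "rounds_in_window": len(win),
--         "coherence_violation": 0,
--         "productive_incoherence": 0,
--     }
--     if win:
--         start = 0 if len(win) == len(ends) else ends[-len(win) - 1] + 1
--         for ev in events[start : win[-1] + 1]:
--             e = ev.get("event")
--             if e == "coherence_violation":
--                 totals["coherence_violation"] += 1
--             elif e == "productive_incoherence":
--                 totals["productive_incoherence"] += 1
--     return totals
-- ===== Notes on version B (the rewrite author's own statement) =====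
-- stated objective: simpler
-- what changed: Instead of materialising a list of per-round sublists and double-looping over the window's rounds, B records the round_complete positions in one enumerate pass and counts over a single contiguous slice of the raw event list.
import Mathlib
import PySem

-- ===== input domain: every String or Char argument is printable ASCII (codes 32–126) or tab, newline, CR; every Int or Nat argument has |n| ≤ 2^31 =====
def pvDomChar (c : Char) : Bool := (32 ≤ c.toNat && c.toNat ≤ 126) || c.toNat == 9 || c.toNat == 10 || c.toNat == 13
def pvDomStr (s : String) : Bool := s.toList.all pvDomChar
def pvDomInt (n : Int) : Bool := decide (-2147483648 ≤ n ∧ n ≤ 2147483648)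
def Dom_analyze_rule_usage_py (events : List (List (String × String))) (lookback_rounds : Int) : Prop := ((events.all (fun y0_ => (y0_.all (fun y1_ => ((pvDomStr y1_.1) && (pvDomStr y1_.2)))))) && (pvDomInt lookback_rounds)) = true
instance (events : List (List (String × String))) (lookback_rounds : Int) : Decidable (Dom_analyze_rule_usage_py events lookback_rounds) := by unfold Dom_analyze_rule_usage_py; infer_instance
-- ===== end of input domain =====

-- B replaces A's split-into-round-sublists + nested double loop by recording the
-- round_complete positions once and counting over a single contiguous slice of events
-- (objective: simpler decomposition; same asymptotic cost, no intermediate list of rounds).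

-- ev.get("event") — shared helper: both Pythons call dict.get the same way
def evGet (ev : List (String × String)) : Option String := (PySem.Dict.mk ev).get? "event"

-- ===== PORT A =====
-- _split_into_rounds
def pvSplitRounds (events : List (List (String × String))) : List (List (List (String × String))) :=
  let s := events.foldl
    (fun (s : List (List (List (String × String))) × List (List (String × String))) ev =>
      let cur := s.2 ++ [ev]
      if evGet ev == some "round_complete" then (s.1 ++ [cur], []) else (s.1, cur))
    ([], [])
  if s.2.isEmpty then s.1 else s.1 ++ [s.2]

def analyze_rule_usage_py (events : List (List (String × String))) (lookback_rounds : Int) : List (String × Int) :=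
  let rounds := pvSplitRounds events
  -- r and r[-1].get("event") == "round_complete"  (r[-1] guarded by r being nonempty)
  let closed := rounds.filter (fun r =>
    !r.isEmpty && (evGet (PySem.List.pyGetD r (-1) []) == some "round_complete"))
  let window := PySem.List.slice closed (some (-lookback_rounds)) none
  let totals : PySem.Dict String Int := PySem.Dict.ofList
    [("rounds_in_window", (window.length : Int)), ("coherence_violation", 0), ("productive_incoherence", 0)]
  let totals := window.foldl (fun t r => r.foldl (fun t ev =>
      let e := evGet ev
      if e == some "coherence_violation" then t.modify "coherence_violation" 0 (· + 1)
      else if e == some "productive_incoherence" then t.modify "productive_incoherence" 0 (· + 1)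
      else t) t) totals
  totals.items

-- ===== PORT B =====
def analyze_rule_usage_py_alt (events : List (List (String × String))) (lookback_rounds : Int) : List (String × Int) :=
  let ends := ((PySem.List.enumerate events 0).filter
      (fun p => evGet p.2 == some "round_complete")).map (·.1)
  let win := PySem.List.slice ends (some (-lookback_rounds)) none
  let totals : PySem.Dict String Int := PySem.Dict.ofList
    [("rounds_in_window", (win.length : Int)), ("coherence_violation", 0), ("productive_incoherence", 0)]
  let totals := if win.isEmpty then totals else
    -- start of the first round in the window (ends[-len(win)-1] only read when in range)
    let start : Int := if win.length == ends.length then 0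
      else PySem.List.pyGetD ends (-(win.length : Int) - 1) 0 + 1
    let seg := PySem.List.slice events (some start) (some (PySem.List.pyGetD win (-1) 0 + 1))
    seg.foldl (fun t ev =>
      let e := evGet ev
      if e == some "coherence_violation" then t.modify "coherence_violation" 0 (· + 1)
      else if e == some "productive_incoherence" then t.modify "productive_incoherence" 0 (· + 1)
      else t) totals
  totals.items

-- ===== PRECONDITION & SPEC =====
def Spec_analyze_rule_usage_py (events : List (List (String × String))) (lookback_rounds : Int) (out : List (String × Int)) : Prop := out = analyze_rule_usage_py_alt events lookback_rounds
instance (events : List (List (String × String))) (lookback_rounds : Int) (out : List (String × Int)) : Decidable (Spec_analyze_rule_usage_py events lookback_rounds out) := by unfold Spec_analyze_rule_usage_py; infer_instance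

-- ===== CLAIM (what is proved, stated in full; the proofs are below) =====
def Claim_equal_analyze_rule_usage_py : Prop := ∀ (events : List (List (String × String))) (lookback_rounds : Int), Dom_analyze_rule_usage_py events lookback_rounds → Spec_analyze_rule_usage_py events lookback_rounds (analyze_rule_usage_py events lookback_rounds)

-- ===== LEMMAS AND PROOFS =====

def isRC (ev : List (String × String)) : Bool := evGet ev == some "round_complete"

-- proof-side recursive version of A's round splitter
def splitRec : List (List (String × String)) → List (List (String × String)) →
    List (List (List (String × String))) × List (List (String × String))
  | cur, [] => ([], cur)
  | cur, e :: es =>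
    if isRC e then ((cur ++ [e]) :: (splitRec [] es).1, (splitRec [] es).2)
    else splitRec (cur ++ [e]) es

-- a closed round: some non-complete events followed by one round_complete
def GoodR (r : List (List (String × String))) : Prop :=
  ∃ c e, r = c ++ [e] ∧ isRC e = true ∧ ∀ x ∈ c, isRC x = false

-- positions of the round ends, given the rounds and a start offset
def posList : Int → List (List (List (String × String))) → List Int
  | _, [] => []
  | s, c :: C => (s + c.length - 1) :: posList (s + c.length) C

lemma pyGetD_neg_one {α : Type} (xs : List α) (d : α) :
    PySem.List.pyGetD xs (-1) d = xs.getLast?.getD d := by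
  cases xs with
  | nil => rfl
  | cons a l =>
    simp [PySem.List.pyGetD, PySem.List.pyGet?, PySem.List.pyIdx?, List.getLast?_eq_getElem?]

lemma pyGetD_neg {α : Type} (xs : List α) (j : Nat) (d : α) (h1 : 0 < j) (h2 : j ≤ xs.length) :
    PySem.List.pyGetD xs (-(j : Int)) d = xs[xs.length - j]'(by omega) := by
  have hn : ¬ (0 : Int) ≤ -(j : Int) := by omega
  have hl : -(xs.length : Int) ≤ -(j : Int) := by omega
  simp only [PySem.List.pyGetD, PySem.List.pyGet?, PySem.List.pyIdx?, hn, hl, if_pos,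
    if_false, neg_neg, Int.toNat_natCast, Option.bind_some]
  rw [List.getElem?_eq_getElem (by omega)]
  rfl

lemma foldA (es : List (List (String × String))) :
    ∀ acc cur, es.foldl
      (fun (s : List (List (List (String × String))) × List (List (String × String))) ev =>
        let cur := s.2 ++ [ev]
        if evGet ev == some "round_complete" then (s.1 ++ [cur], []) else (s.1, cur)) (acc, cur)
      = (acc ++ (splitRec cur es).1, (splitRec cur es).2) := by
  induction es with
  | nil => intro acc cur; simp [splitRec]
  | cons e es ih =>
    intro acc cur
    by_cases h : isRC e = true
    · have h' : (evGet e == some "round_complete") = true := h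
      simp only [List.foldl_cons, h', if_pos, splitRec, h]
      rw [ih]
      simp
    · have h' : (evGet e == some "round_complete") = false := by
        simpa [isRC] using h
      simp only [List.foldl_cons, h', Bool.false_eq_true, if_false, splitRec, h]
      rw [ih]

lemma flatten_split (es : List (List (String × String))) :
    ∀ cur, (splitRec cur es).1.flatten ++ (splitRec cur es).2 = cur ++ es := by
  induction es with
  | nil => intro cur; simp [splitRec]
  | cons e es ih =>
    intro cur
    by_cases h : isRC e = true
    · simp only [splitRec, h, if_true, List.flatten_cons, List.append_assoc]
      rw [ih []]
      simp
    · simp only [splitRec, h, Bool.false_eq_true, if_false]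
      rw [ih (cur ++ [e])]
      simp

lemma good_split (es : List (List (String × String))) :
    ∀ cur, (∀ x ∈ cur, isRC x = false) → ∀ r ∈ (splitRec cur es).1, GoodR r := by
  induction es with
  | nil => intro cur _ r hr; simp [splitRec] at hr
  | cons e es ih =>
    intro cur hcur r hr
    by_cases h : isRC e = true
    · simp only [splitRec, h, if_true, List.mem_cons] at hr
      rcases hr with rfl | hr
      · exact ⟨cur, e, rfl, h, hcur⟩
      · exact ih [] (by simp) r hr
    · simp only [splitRec, h, Bool.false_eq_true, if_false] at hr
      refine ih (cur ++ [e]) ?_ r hr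
      intro x hx
      rcases List.mem_append.1 hx with hx | hx
      · exact hcur x hx
      · simp at hx; subst hx; simpa using h

lemma tail_no_rc (es : List (List (String × String))) :
    ∀ cur, (∀ x ∈ cur, isRC x = false) → ∀ x ∈ (splitRec cur es).2, isRC x = false := by
  induction es with
  | nil => intro cur hcur x hx; exact hcur x hx
  | cons e es ih =>
    intro cur hcur x hx
    by_cases h : isRC e = true
    · simp only [splitRec, h, if_true] at hx
      exact ih [] (by simp) x hx
    · simp only [splitRec, h, Bool.false_eq_true, if_false] at hx
      refine ih (cur ++ [e]) ?_ x hx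
      intro y hy
      rcases List.mem_append.1 hy with hy | hy
      · exact hcur y hy
      · simp at hy; subst hy; simpa using h

lemma closedPred_of_good (r : List (List (String × String))) (h : GoodR r) :
    (!r.isEmpty && (evGet (PySem.List.pyGetD r (-1) []) == some "round_complete")) = true := by
  obtain ⟨c, e, rfl, he, -⟩ := h
  rw [pyGetD_neg_one, List.getLast?_concat]
  simp [isRC] at he
  simp [he]

lemma closedPred_of_tail (r : List (List (String × String))) (hne : r ≠ [])
    (h : ∀ x ∈ r, isRC x = false) :
    (!r.isEmpty && (evGet (PySem.List.pyGetD r (-1) []) == some "round_complete")) = false := by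
  rcases List.eq_nil_or_concat r with rfl | ⟨ys, a, rfl⟩
  · exact absurd rfl hne
  · simp only [List.concat_eq_append]
    rw [pyGetD_neg_one, List.getLast?_concat]
    have := h a (by simp)
    simp [isRC] at this
    simp [this]

lemma closed_eq (es : List (List (String × String))) :
    (pvSplitRounds es).filter
      (fun r => !r.isEmpty && (evGet (PySem.List.pyGetD r (-1) []) == some "round_complete"))
      = (splitRec [] es).1 := by
  unfold pvSplitRounds
  rw [foldA es [] []]
  simp only [List.nil_append]
  have hfC : (splitRec [] es).1.filter
      (fun r => !r.isEmpty && (evGet (PySem.List.pyGetD r (-1) []) == some "round_complete"))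
      = (splitRec [] es).1 :=
    List.filter_eq_self.2 (fun r hr => closedPred_of_good r (good_split es [] (by simp) r hr))
  by_cases h : (splitRec [] es).2.isEmpty
  · simpa [h] using hfC
  · have hne : (splitRec [] es).2 ≠ [] := by simpa [List.isEmpty_iff] using h
    rw [if_neg (by simpa using h), List.filter_append, hfC]
    rw [List.filter_cons, closedPred_of_tail _ hne (tail_no_rc es [] (by simp))]
    simp

lemma noRC_filter_enum (xs : List (List (String × String)))
    (h : ∀ x ∈ xs, isRC x = false) (s : Int) :
    (PySem.List.enumerate xs s).filter
      (fun p => evGet p.2 == some "round_complete") = [] := by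
  induction xs generalizing s with
  | nil => simp [PySem.List.enumerate]
  | cons x xs ih =>
    rw [PySem.List.enumerate_cons, List.filter_cons]
    have hx := h x (by simp)
    simp only [isRC] at hx
    simp only [hx, Bool.false_eq_true, if_false]
    exact ih (fun y hy => h y (by simp [hy])) (s + 1)

lemma ends_eq (tr : List (List (String × String))) (htr : ∀ x ∈ tr, isRC x = false) :
    ∀ (C : List (List (List (String × String)))), (∀ c ∈ C, GoodR c) → ∀ s : Int,
      ((PySem.List.enumerate (C.flatten ++ tr) s).filter
      (fun p => evGet p.2 == some "round_complete")).map (·.1) = posList s C := by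
  intro C
  induction C with
  | nil =>
    intro _ s
    simp only [List.flatten_nil, List.nil_append, posList]
    rw [noRC_filter_enum tr htr s]
    rfl
  | cons c C ih =>
    intro hC s
    obtain ⟨c', e, hce, he, hc'⟩ := hC c (by simp)
    simp only [List.flatten_cons, List.append_assoc]
    rw [PySem.List.enumerate_append, List.filter_append, List.map_append]
    rw [ih (fun x hx => hC x (by simp [hx])) (s + c.length)]
    subst hce
    rw [PySem.List.enumerate_append, List.filter_append, List.map_append]
    rw [noRC_filter_enum c' hc']
    have he' : (evGet e == some "round_complete") = true := he
    simp only [PySem.List.enumerate_cons, PySem.List.enumerate_nil, List.filter_cons, he',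
      if_true, List.filter_nil, List.map_cons, List.map_nil, List.nil_append]
    simp only [posList, List.length_append, List.length_cons, List.length_nil]
    push_cast
    simp
    ring

lemma posList_length (C : List (List (List (String × String)))) :
    ∀ s, (posList s C).length = C.length := by
  induction C with
  | nil => intro s; rfl
  | cons c C ih => intro s; simp [posList, ih]

lemma posList_get (C : List (List (List (String × String)))) :
    ∀ (s : Int) (j : Nat) (hj : j < C.length),
      (posList s C)[j]'(by rw [posList_length]; exact hj)
        = s + (((C.take (j + 1)).flatten.length : Int)) - 1 := by
  induction C with
  | nil => intro s j hj; simp at hj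
  | cons c C ih =>
    intro s j hj
    cases j with
    | zero => simp [posList]
    | succ j =>
      simp only [posList, List.getElem_cons_succ]
      rw [ih (s + c.length) j (by simpa using hj)]
      simp only [List.take_succ_cons, List.flatten_cons, List.length_append]
      push_cast
      ring

-- the shared counting step (both ports' inner loop body)
lemma main_eq (es : List (List (String × String))) (lb : Int) :
    analyze_rule_usage_py es lb = analyze_rule_usage_py_alt es lb := by
  obtain ⟨C, tr, hsplit⟩ : ∃ C tr, splitRec [] es = (C, tr) := ⟨_, _, rfl⟩
  have hC : ∀ c ∈ C, GoodR c := by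
    have := good_split es [] (by simp); rw [hsplit] at this; exact this
  have htr : ∀ x ∈ tr, isRC x = false := by
    have := tail_no_rc es [] (by simp); rw [hsplit] at this; exact this
  have hflat : C.flatten ++ tr = es := by
    have := flatten_split es []; rw [hsplit] at this; simpa using this
  have hclosed : (pvSplitRounds es).filter
      (fun r => !r.isEmpty && (evGet (PySem.List.pyGetD r (-1) []) == some "round_complete"))
      = C := by rw [closed_eq, hsplit]
  have hends : ((PySem.List.enumerate es 0).filter
      (fun p => evGet p.2 == some "round_complete")).map (·.1) = posList 0 C := by
    rw [← hflat]; exact ends_eq tr htr C hC 0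
  set m := C.length with hm
  set k := PySem.List.clampIdx m (-lb) with hk
  have hkm : k ≤ m := PySem.List.clampIdx_le m (-lb)
  -- both windows are drops by the same k
  have hlenE : (posList 0 C).length = m := posList_length C 0
  simp only [analyze_rule_usage_py, analyze_rule_usage_py_alt, hclosed, hends,
    PySem.List.slice_some_none, hlenE, ← hm, ← hk]
  by_cases hkm0 : m ≤ k
  · have hk' : k = m := le_antisymm hkm hkm0
    have h1 : List.drop k C = [] := by rw [hk', hm]; exact List.drop_length
    have h2 : List.drop k (posList 0 C) = [] := by
      apply List.drop_eq_nil_of_le; rw [hlenE, hk']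
    rw [h1, h2]
    simp
  · replace hkm0 : k < m := by omega
    have hwl : (List.drop k (posList 0 C)).length = m - k := by rw [List.length_drop, hlenE]
    have hwne : (List.drop k (posList 0 C)).isEmpty = false := by
      rcases hE : List.drop k (posList 0 C) with _ | ⟨a, l⟩
      · have := congrArg List.length hE
        rw [hwl] at this
        simp at this
        omega
      · rfl
    rw [hwne]
    simp only [Bool.false_eq_true, if_false]
    -- start index equals the length of the flatten of the first k rounds
    have hstart : (if ((List.drop k (posList 0 C)).length == m) = true then (0 : Int)
        else PySem.List.pyGetD (posList 0 C) (-((List.drop k (posList 0 C)).length : Int) - 1) 0 + 1)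
        = (((C.take k).flatten.length : Nat) : Int) := by
      by_cases hk0 : k = 0
      · rw [hk0]
        simp [hlenE]
      · have hbne : ((List.drop k (posList 0 C)).length == m) = false := by
          rw [hwl]; simp; omega
        rw [hbne]
        simp only [Bool.false_eq_true, if_false]
        have hj : (-((List.drop k (posList 0 C)).length : Int) - 1) = -(((m - k + 1 : Nat)) : Int) := by
          rw [hwl]; push_cast [Nat.cast_sub hkm]; ring
        rw [hj, pyGetD_neg (posList 0 C) (m - k + 1) 0 (by omega) (by rw [hlenE]; omega)]
        have hidx : (posList 0 C).length - (m - k + 1) = k - 1 := by rw [hlenE]; omega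
        have := posList_get C 0 (k - 1) (by omega)
        simp only [hidx]
        rw [this]
        have : k - 1 + 1 = k := by omega
        rw [this]
        ring
    rw [hstart]
    -- last window position + 1 equals the length of the flatten of all rounds
    have hlast : PySem.List.pyGetD (List.drop k (posList 0 C)) (-1) 0 + 1
        = ((C.flatten.length : Nat) : Int) := by
      rw [pyGetD_neg_one]
      have : (List.drop k (posList 0 C)).getLast? = some ((C.flatten.length : Int) - 1) := by
        rw [List.getLast?_eq_getElem?, List.getElem?_drop, hwl]
        have hix : k + (m - k - 1) = m - 1 := by omega
        rw [hix, List.getElem?_eq_getElem (by rw [hlenE]; omega)]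
        rw [posList_get C 0 (m - 1) (by omega)]
        have : m - 1 + 1 = m := by omega
        rw [this, hm, List.take_length]
        ring_nf
      rw [this]
      simp
    rw [hlast]
    -- the sliced segment is the flatten of the window rounds
    have hes2 : C.flatten = (C.take k).flatten ++ (C.drop k).flatten := by
      rw [← List.flatten_append, List.take_append_drop]
    have hseg : PySem.List.slice es (some (((C.take k).flatten.length : Nat) : Int))
        (some ((C.flatten.length : Nat) : Int)) = (C.drop k).flatten := by
      rw [← hflat]
      have hlen2 : (C.flatten.length : Int)
          = ((C.take k).flatten.length : Int) + ((C.drop k).flatten.length : Int) := by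
        rw [hes2]; push_cast [List.length_append]; ring
      rw [hlen2, ← Nat.cast_add, PySem.List.slice_natCast]
      rw [hes2, List.append_assoc, List.drop_left]
      rw [Nat.add_sub_cancel_left, List.take_left]
    have hwl2 : (List.drop k C).length = m - k := by rw [List.length_drop, ← hm]
    rw [hseg, hwl, hwl2, List.foldl_flatten]

-- ===== VERDICT (by name: the statement is the Claim_ definition above) =====
theorem analyze_rule_usage_py_spec : Claim_equal_analyze_rule_usage_py := by
  intro es lb _
  unfold Spec_analyze_rule_usage_py
  exact main_eq es lb
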